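-- pv_equiv track=rewrite | github.com/zubie7a/Algorithms | CodeSignal/Arcade/Intro/Level_10/01_Is_Beautiful_String.py | isBeautifulString
-- ===== SOURCE A (Python) =====
-- from collections import Counter
-- import string
--
-- def isBeautifulString(input_string):
--     # Lets create a base counter with all the letters of the alphabet,
--     # then we add the actual counts. Without this, we can't account for
--     # missing letters in the input string counts.
--     # all_letters = "abcdefghijklmnopqrstuvwxyz"
--     all_letters = string.ascii_lowercase
--     alphabet = Counter(all_letters)
--     counts = Counter(input_string)
--     counts = counts + alphabet
--     sorted_keys = sorted(counts.keys())
--     for index in range(len(sorted_keys) - 1):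
--         key1 = sorted_keys[index]
--         key2 = sorted_keys[index + 1]
--         if counts[key2] > counts[key1]:
--             return False
--
--     return True
-- ===== SOURCE B (Python) =====
-- import string
--
-- def isBeautifulString(input_string):
--     # Beautiful iff for every pair of relevant characters a < b, the
--     # alphabet-padded count of a is >= that of b.  No counting table and no
--     # sorting: "non-increasing along the sorted key sequence" is equivalent
--     # to this pairwise condition because <= is transitive.
--     keys = set(input_string) | set(string.ascii_lowercase)
--
--     def cnt(c):
--         return input_string.count(c) + (c in string.ascii_lowercase)
--
--     return all(cnt(a) >= cnt(b) for a in keys for b in keys if a < b)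
-- ===== Notes on version B (the rewrite author's own statement) =====
-- stated objective: alternative
-- what changed: Replaces Counter construction, Counter-addition, key sorting and the adjacent-pair index loop by a brute-force pairwise test: over the set of relevant characters (input chars plus the 26 lowercase letters), check cnt(a) >= cnt(b) for every pair a < b, with counts taken directly by str.count plus a lowercase indicator -- no counting table, no sort; correct because non-increasing along the sorted key sequence is equivalent to the pairwise condition by transitivity.
import Mathlib
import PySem

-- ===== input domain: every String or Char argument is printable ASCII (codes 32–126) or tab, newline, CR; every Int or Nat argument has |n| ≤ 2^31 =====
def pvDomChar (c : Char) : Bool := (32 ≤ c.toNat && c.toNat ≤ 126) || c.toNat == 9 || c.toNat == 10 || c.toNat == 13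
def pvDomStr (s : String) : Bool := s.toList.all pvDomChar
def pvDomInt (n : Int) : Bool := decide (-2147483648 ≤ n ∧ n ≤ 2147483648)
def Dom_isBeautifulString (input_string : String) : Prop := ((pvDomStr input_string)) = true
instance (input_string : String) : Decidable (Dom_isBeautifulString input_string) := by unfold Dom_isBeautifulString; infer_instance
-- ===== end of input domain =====

-- B drops the counting table and the sort entirely: it checks the pairwise condition
-- cnt(a) >= cnt(b) over all pairs a < b of relevant characters (objective: alternative).

-- ===== PORT A =====
-- string.ascii_lowercase
def pvLower : String := "abcdefghijklmnopqrstuvwxyz"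

-- hand port of collections.Counter.__add__ (exact): sum counts over self's keys in their
-- order, then append other's keys missing from self, keeping only positive counts.
def counterAdd (a b : PySem.Dict Char Int) : PySem.Dict Char Int :=
  let r := a.items.foldl
    (fun r p => let n := p.2 + b.getD p.1 0; if 0 < n then r.insert p.1 n else r)
    PySem.Dict.empty
  b.items.foldl
    (fun r p => if !a.contains p.1 && decide (0 < p.2) then r.insert p.1 p.2 else r) r

def isBeautifulString (input_string : String) : Bool :=
  let all_letters := pvLower
  let alphabet := PySem.Dict.counter all_letters.toList
  let counts0 := PySem.Dict.counter input_string.toList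
  let counts := counterAdd counts0 alphabet
  let sorted_keys := PySem.List.sorted counts.keys (fun x => x) false
  (PySem.List.pyRange 0 ((sorted_keys.length : Int) - 1) 1).all (fun index =>
    let key1 := PySem.List.pyGetD sorted_keys index ' '
    let key2 := PySem.List.pyGetD sorted_keys (index + 1) ' '
    !(decide (counts.getD key2 0 > counts.getD key1 0)))

-- ===== PORT B =====
-- keys = set(input_string) | set(string.ascii_lowercase); the `all` over pairs is
-- order-independent, so consuming the Set's elements here is exact.
def isBeautifulString_alt (input_string : String) : Bool :=
  let keys := PySem.Set.union (PySem.Set.ofList input_string.toList) pvLower.toList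
  let cnt := fun (c : Char) =>
    (input_string.toList.count c : Int) + (if pvLower.toList.contains c then 1 else 0)
  keys.all (fun a => keys.all (fun b => !(decide (a < b)) || decide (cnt a ≥ cnt b)))

-- ===== PRECONDITION & SPEC =====
def Spec_isBeautifulString (input_string : String) (out : Bool) : Prop := out = isBeautifulString_alt input_string
instance (input_string : String) (out : Bool) : Decidable (Spec_isBeautifulString input_string out) := by unfold Spec_isBeautifulString; infer_instance

-- ===== CLAIM (what is proved, stated in full; the proofs are below) =====
def Claim_equal_isBeautifulString : Prop := ∀ (input_string : String), Dom_isBeautifulString input_string → Spec_isBeautifulString input_string (isBeautifulString input_string)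

-- ===== LEMMAS AND PROOFS =====

-- the common count function: raw count in the input, +1 for the 26 lowercase letters
def pvCnt (s : List Char) (k : Char) : Int := s.count k + pvLower.toList.count k

-- the common key list: distinct input characters, then missing lowercase letters
def pvKeys (s : List Char) : List Char :=
  PySem.Set.ofList s ++ pvLower.toList.filter (fun k => !s.contains k)

theorem pvLower_nodup : pvLower.toList.Nodup := by decide

theorem foldl_if_insert {α β : Type} (l : List α) (c : α → Bool) (g : β → α → β) (init : β) :
    l.foldl (fun r p => if c p then g r p else r) init = (l.filter c).foldl g init := by
  induction l generalizing init with
  | nil => rfl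
  | cons x xs ih =>
      by_cases h : c x = true <;> simp [List.filter, h, ih]

theorem countsA_items (s : List Char) :
    (counterAdd (PySem.Dict.counter s) (PySem.Dict.counter pvLower.toList)).items =
      (PySem.Set.ofList s).map (fun k => (k, pvCnt s k)) ++
      (pvLower.toList.filter (fun k => !s.contains k)).map (fun k => (k, (1 : Int))) := by
  unfold counterAdd
  have h1 : (PySem.Dict.counter s).items.foldl
      (fun r p => let n := p.2 + (PySem.Dict.counter pvLower.toList).getD p.1 0;
        if 0 < n then r.insert p.1 n else r) PySem.Dict.empty
      = (PySem.Set.ofList s).foldl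
        (fun r k => r.insert k ((s.count k : Int) + (PySem.Dict.counter pvLower.toList).getD k 0))
        PySem.Dict.empty := by
    rw [PySem.List.foldl_congr_mem _ _
      (fun r p => r.insert p.1 (p.2 + (PySem.Dict.counter pvLower.toList).getD p.1 0)) _ ?_]
    · rw [PySem.Dict.items_counter, List.foldl_map]
    · intro acc x hx
      rw [PySem.Dict.items_counter] at hx
      obtain ⟨k, hk, rfl⟩ := List.mem_map.mp hx
      have hks : k ∈ s := (PySem.Set.mem_ofList s k).mp hk
      have hc : 0 < s.count k := List.count_pos_iff.mpr hks
      have hd : 0 ≤ (PySem.Dict.counter pvLower.toList).getD k 0 := by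
        rw [PySem.Dict.getD_counter]; positivity
      simp only []
      rw [if_pos (by omega)]
  rw [h1, foldl_if_insert]
  have hitems1 : ((PySem.Set.ofList s).foldl
      (fun r k => r.insert k ((s.count k : Int) + (PySem.Dict.counter pvLower.toList).getD k 0))
      PySem.Dict.empty).items
      = (PySem.Set.ofList s).map (fun k => (k, pvCnt s k)) := by
    have h := PySem.Dict.items_foldl_insert_fresh (PySem.Set.ofList s) (fun k => k)
      (fun k => (s.count k : Int) + (PySem.Dict.counter pvLower.toList).getD k 0)
      PySem.Dict.empty (fun a _ => PySem.Dict.contains_empty a) (by simp [PySem.Set.nodup_ofList])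
    rw [h]
    simp [PySem.Dict.getD_counter, pvCnt, PySem.Dict.empty]
  have hfilter : ((PySem.Dict.counter pvLower.toList).items.filter
        (fun p => !(PySem.Dict.counter s).contains p.1 && decide (0 < p.2)))
      = (pvLower.toList.filter (fun k => !s.contains k)).map (fun k => (k, (1 : Int))) := by
    rw [PySem.Dict.items_counter, PySem.Set.ofList_eq_self_of_nodup _ pvLower_nodup,
      List.filter_map]
    have hpred : pvLower.toList.filter
        ((fun p : Char × Int => !(PySem.Dict.counter s).contains p.1 && decide (0 < p.2)) ∘
          (fun k => (k, (pvLower.toList.count k : Int))))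
        = pvLower.toList.filter (fun k => !s.contains k) := by
      apply List.filter_congr
      intro k hk
      have hc1 : pvLower.toList.count k = 1 := List.count_eq_one_of_mem pvLower_nodup hk
      simp [PySem.Dict.contains_counter, hc1]
    rw [hpred]
    apply List.map_congr_left
    intro k hk
    have hk' : k ∈ pvLower.toList := List.mem_of_mem_filter hk
    have hc1 : pvLower.toList.count k = 1 := List.count_eq_one_of_mem pvLower_nodup hk'
    simp [hc1]
  rw [hfilter]
  have hkeys1 : ((PySem.Set.ofList s).foldl
      (fun r k => r.insert k ((s.count k : Int) + (PySem.Dict.counter pvLower.toList).getD k 0))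
      PySem.Dict.empty).keys = PySem.Set.ofList s := by
    rw [PySem.Dict.keys_foldl_insert, PySem.Dict.keys_empty, PySem.Set.update_nil_left,
      PySem.Set.ofList_ofList]
  rw [List.foldl_map]
  have h2 := PySem.Dict.items_foldl_insert_fresh
    (pvLower.toList.filter (fun k => !s.contains k)) (fun k => k) (fun _ => (1 : Int))
    ((PySem.Set.ofList s).foldl
      (fun r k => r.insert k ((s.count k : Int) + (PySem.Dict.counter pvLower.toList).getD k 0))
      PySem.Dict.empty) ?_ ?_
  · rw [h2, hitems1]
  · intro a ha
    have hnot : a ∉ s := by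
      have := List.of_mem_filter ha
      simpa using this
    rw [← Bool.not_eq_true, PySem.Dict.contains_iff_mem_keys, hkeys1]
    intro hmem
    exact hnot ((PySem.Set.mem_ofList s a).mp hmem)
  · simpa using (pvLower_nodup.filter (fun k => !s.contains k))

theorem countsA_keys (s : List Char) :
    (counterAdd (PySem.Dict.counter s) (PySem.Dict.counter pvLower.toList)).keys = pvKeys s := by
  simp only [PySem.Dict.keys, countsA_items, List.map_append, List.map_map, pvKeys]
  simp [Function.comp_def]

theorem pvKeys_nodup (s : List Char) : (pvKeys s).Nodup := by
  rw [pvKeys]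
  refine List.Nodup.append (PySem.Set.nodup_ofList s) (pvLower_nodup.filter _) ?_
  intro a ha hb
  have := List.of_mem_filter hb
  simp only [Bool.not_eq_eq_eq_not, Bool.not_true, List.contains_eq_mem, decide_eq_false_iff_not] at this
  exact this ((PySem.Set.mem_ofList s a).mp ha)

theorem mem_pvKeys (s : List Char) (k : Char) :
    k ∈ pvKeys s ↔ k ∈ s ∨ k ∈ pvLower.toList := by
  rw [pvKeys]
  simp only [List.mem_append, PySem.Set.mem_ofList, List.mem_filter]
  constructor
  · rintro (h | ⟨h, _⟩)
    · exact Or.inl h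
    · exact Or.inr h
  · rintro (h | h)
    · exact Or.inl h
    · by_cases hs : k ∈ s
      · exact Or.inl hs
      · exact Or.inr ⟨h, by simpa using hs⟩

theorem countsA_getD (s : List Char) (k : Char) :
    (counterAdd (PySem.Dict.counter s) (PySem.Dict.counter pvLower.toList)).getD k 0 = pvCnt s k := by
  have hnd : (counterAdd (PySem.Dict.counter s) (PySem.Dict.counter pvLower.toList)).keys.Nodup := by
    rw [countsA_keys]; exact pvKeys_nodup s
  by_cases hs : k ∈ s
  · have hmem : (k, pvCnt s k) ∈
        (counterAdd (PySem.Dict.counter s) (PySem.Dict.counter pvLower.toList)).items := by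
      rw [countsA_items]
      exact List.mem_append_left _ (List.mem_map.mpr ⟨k, (PySem.Set.mem_ofList s k).mpr hs, rfl⟩)
    exact PySem.Dict.getD_of_mem_items _ hmem hnd 0
  · by_cases hl : k ∈ pvLower.toList
    · have hmem : (k, (1 : Int)) ∈
          (counterAdd (PySem.Dict.counter s) (PySem.Dict.counter pvLower.toList)).items := by
        rw [countsA_items]
        refine List.mem_append_right _ (List.mem_map.mpr ⟨k, ?_, rfl⟩)
        exact List.mem_filter.mpr ⟨hl, by simpa using hs⟩
      have h1 : pvCnt s k = 1 := by
        rw [pvCnt, List.count_eq_zero.mpr hs, List.count_eq_one_of_mem pvLower_nodup hl]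
        rfl
      rw [h1]
      exact PySem.Dict.getD_of_mem_items _ hmem hnd 0
    · have hnc : (counterAdd (PySem.Dict.counter s) (PySem.Dict.counter pvLower.toList)).contains k = false := by
        rw [← Bool.not_eq_true, PySem.Dict.contains_iff_mem_keys, countsA_keys]
        intro hmem
        rcases (mem_pvKeys s k).mp hmem with h | h
        · exact hs h
        · exact hl h
      rw [PySem.Dict.getD_of_not_contains _ _ hnc, pvCnt,
        List.count_eq_zero.mpr hs, List.count_eq_zero.mpr hl]
      rfl

-- B's per-character count is pvCnt
theorem cntB_eq_pvCnt (s : List Char) (k : Char) :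
    (s.count k : Int) + (if pvLower.toList.contains k then 1 else 0) = pvCnt s k := by
  rw [pvCnt]
  by_cases h : k ∈ pvLower.toList
  · rw [List.count_eq_one_of_mem pvLower_nodup h, if_pos (by simpa using h)]
    rfl
  · rw [List.count_eq_zero.mpr h, if_neg (by simpa using h)]
    rfl

-- A's loop over adjacent sorted keys = the non-increasing chain on the mapped counts
theorem loopA_eq_chain (l : List Char) (h : Char → Int) :
    ((PySem.List.pyRange 0 ((l.length : Int) - 1) 1).all (fun index =>
      !(decide (h (PySem.List.pyGetD l (index + 1) ' ') > h (PySem.List.pyGetD l index ' '))))) =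
    decide (List.IsChain (fun a b : Int => b ≤ a) (l.map h)) := by
  rw [Bool.eq_iff_iff]
  simp only [List.all_eq_true, Bool.not_eq_eq_eq_not, Bool.not_true, decide_eq_false_iff_not,
    not_lt, decide_eq_true_eq, List.isChain_iff_getElem, List.length_map, List.getElem_map]
  constructor
  · intro H i hi
    have hmem : (i : Int) ∈ PySem.List.pyRange 0 ((l.length : Int) - 1) 1 := by
      rw [PySem.List.mem_pyRange_one]; omega
    have := H (i : Int) hmem
    rw [PySem.List.pyGetD_eq_getElem l ' ' (by omega) (by omega),
        PySem.List.pyGetD_eq_getElem l ' ' (by omega) (by omega)] at this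
    simpa using this
  · intro H i hmem
    rw [PySem.List.mem_pyRange_one] at hmem
    have hi1 : i.toNat + 1 < l.length := by omega
    rw [PySem.List.pyGetD_eq_getElem l ' ' (by omega) (by omega),
        PySem.List.pyGetD_eq_getElem l ' ' (by omega) (by omega)]
    have := H i.toNat hi1
    have he : (i + 1).toNat = i.toNat + 1 := by omega
    simp only [he]
    exact this

-- on a strictly increasing list, the non-increasing chain = the pairwise condition
theorem chain_iff_pairwise_cond (l : List Char) (h : Char → Int)
    (hlt : l.Pairwise (· < ·)) :
    List.IsChain (fun a b : Int => b ≤ a) (l.map h) ↔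
      ∀ a ∈ l, ∀ b ∈ l, a < b → h b ≤ h a := by
  haveI : Trans (fun a b : Int => b ≤ a) (fun a b : Int => b ≤ a) (fun a b : Int => b ≤ a) :=
    ⟨fun h1 h2 => le_trans h2 h1⟩
  rw [List.isChain_iff_pairwise, List.pairwise_map]
  rw [List.pairwise_iff_getElem] at hlt ⊢
  constructor
  · intro H a ha b hb hab
    obtain ⟨i, hi, rfl⟩ := List.getElem_of_mem ha
    obtain ⟨j, hj, rfl⟩ := List.getElem_of_mem hb
    rcases lt_trichotomy i j with hij | hij | hij
    · exact H i j hi hj hij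
    · subst hij; exact absurd hab (lt_irrefl _)
    · exact absurd (hlt j i hj hi hij) (by
        intro hlt2
        exact absurd (lt_trans hab hlt2) (lt_irrefl _))
  · intro H i j hi hj hij
    exact H _ (List.getElem_mem hi) _ (List.getElem_mem hj) (hlt i j hi hj hij)

-- membership in B's key set = membership in pvKeys
theorem mem_keysB (s : List Char) (k : Char) :
    k ∈ PySem.Set.union (PySem.Set.ofList s) pvLower.toList ↔ k ∈ pvKeys s := by
  rw [PySem.Set.mem_union, PySem.Set.mem_ofList, mem_pvKeys]

theorem sortedKeys_pairwise_lt (s : List Char) :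
    (PySem.List.sorted (pvKeys s) (fun x => x) false).Pairwise (· < ·) := by
  have hle : (PySem.List.sorted (pvKeys s) (fun x => x) false).Pairwise
      (fun a b : Char => a ≤ b) := PySem.List.sorted_pairwise (pvKeys s) (fun x => x)
  have hnd : (PySem.List.sorted (pvKeys s) (fun x => x) false).Nodup :=
    (PySem.List.sorted_perm (pvKeys s) (fun x => x) false).nodup_iff.mpr (pvKeys_nodup s)
  have := hle.and hnd
  exact this.imp (fun {a b} hab => lt_of_le_of_ne hab.1 hab.2)

theorem isBeautifulString_spec : Claim_equal_isBeautifulString := by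
  intro s _
  unfold Spec_isBeautifulString isBeautifulString isBeautifulString_alt
  simp only [countsA_keys]
  rw [loopA_eq_chain _ (fun k =>
    (counterAdd (PySem.Dict.counter s.toList) (PySem.Dict.counter pvLower.toList)).getD k 0)]
  rw [Bool.eq_iff_iff]
  simp only [List.all_eq_true, Bool.or_eq_true, Bool.not_eq_eq_eq_not, Bool.not_true,
    decide_eq_false_iff_not, decide_eq_true_eq, not_lt, ge_iff_le]
  have hchain := chain_iff_pairwise_cond (PySem.List.sorted (pvKeys s.toList) (fun x => x) false)
    (fun k => (counterAdd (PySem.Dict.counter s.toList) (PySem.Dict.counter pvLower.toList)).getD k 0)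
    (sortedKeys_pairwise_lt s.toList)
  rw [hchain]
  constructor
  · intro H a ha b hb
    rcases le_or_gt b a with hba | hab
    · exact Or.inl hba
    · refine Or.inr ?_
      rw [cntB_eq_pvCnt, cntB_eq_pvCnt]
      have := H a (by rw [PySem.List.mem_sorted]; exact (mem_keysB s.toList a).mp ha)
        b (by rw [PySem.List.mem_sorted]; exact (mem_keysB s.toList b).mp hb) hab
      simpa only [countsA_getD] using this
  · intro H a ha b hb hab
    rw [PySem.List.mem_sorted] at ha hb
    have := H a ((mem_keysB s.toList a).mpr ha) b ((mem_keysB s.toList b).mpr hb)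
    rcases this with hba | hle
    · exact absurd hab (not_lt.mpr hba)
    · rw [cntB_eq_pvCnt, cntB_eq_pvCnt] at hle
      simpa only [countsA_getD] using hle
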